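-- pv_equiv track=rewrite | github.com/MrBrantCode/unitest_baseline | mut_generate/mist_train_taco/taco_485/solution.py | are_encryptions_same
-- ===== SOURCE A (Python) =====
-- def are_encryptions_same(s1: str, s2: str) -> bool:
--     """
--     Determines if the encryptions of two given strings are the same.
--
--     The encryption algorithm is as follows:
--     1. Take the first and the last letters of the word.
--     2. Replace the letters between them with their number.
--     3. Replace this number with the sum of its digits until a single digit is obtained.
--
--     Parameters:
--     - s1 (str): The first string to be encrypted.
--     - s2 (str): The second string to be encrypted.
--
--     Returns:
--     - bool: True if the encryptions are the same, False otherwise.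
--     """
--     def single_digit_sum(n: int) -> int:
--         """Helper function to reduce a number to a single digit by summing its digits."""
--         while n >= 10:
--             n = sum(int(digit) for digit in str(n))
--         return n
--
--     # Calculate the single digit sum of the length of the string
--     len_s1_single_digit = single_digit_sum(len(s1) - 2)
--     len_s2_single_digit = single_digit_sum(len(s2) - 2)
--
--     # Compare the first and last characters and the single digit sum of the lengths
--     return (s1[0], s1[-1], len_s1_single_digit) == (s2[0], s2[-1], len_s2_single_digit)
-- ===== SOURCE B (Python) =====
-- def are_encryptions_same(s1: str, s2: str) -> bool:
--     def digital_root(n: int) -> int: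
--         # closed-form digital root; values below 10 (incl. negatives from len 0/1) pass through
--         return n if n < 10 else 1 + (n - 1) % 9
--     return (s1[0], s1[-1], digital_root(len(s1) - 2)) == (s2[0], s2[-1], digital_root(len(s2) - 2))
-- ===== Notes on version B (the rewrite author's own statement) =====
-- stated objective: simpler
-- what changed: The iterative repeated digit-summing loop (convert to string, sum digits, repeat while >= 10) is replaced by the constant-time closed-form digital root 1 + (n-1) % 9 (with n passed through unchanged when n < 10).
import Mathlib
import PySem

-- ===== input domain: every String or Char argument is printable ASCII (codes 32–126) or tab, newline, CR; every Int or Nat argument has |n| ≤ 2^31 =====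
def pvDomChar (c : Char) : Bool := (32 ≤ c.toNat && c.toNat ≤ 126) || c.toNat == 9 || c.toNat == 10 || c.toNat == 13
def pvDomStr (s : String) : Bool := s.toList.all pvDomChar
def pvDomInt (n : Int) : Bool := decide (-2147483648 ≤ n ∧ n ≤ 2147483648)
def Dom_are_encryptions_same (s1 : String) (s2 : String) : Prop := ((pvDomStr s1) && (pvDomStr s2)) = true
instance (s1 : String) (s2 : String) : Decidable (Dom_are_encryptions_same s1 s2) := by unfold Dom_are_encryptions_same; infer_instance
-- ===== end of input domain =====

-- B replaces A's iterative repeated digit-summing loop by the closed-form digital root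
-- 1 + (n-1) % 9 (n < 10 passes through); objective: simpler.


-- ===== PORT A =====
-- sum(int(digit) for digit in str(n)): str(n) is PySem.Int.toChars, int(one-char string)
-- is PySem.Int.ofChars? [c]; on the digit characters str(n) produces for n ≥ 10 it always
-- returns some, so .getD 0 is exact there (the loop body only runs with n ≥ 10).
def pyDigitSum (n : Int) : Int :=
  ((PySem.Int.toChars n).map (fun c => (PySem.Int.ofChars? [c]).getD 0)).sum

-- The next two lemmas are cited by the port's decreasing_by, so they stay above it.
theorem pyDigitSum_eq_digits (n : Int) (h : 0 ≤ n) :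
    pyDigitSum n = ((Nat.digits 10 n.toNat).sum : Int) := by
  have key : ∀ (f m : Nat) (acc : List Char), m ≤ f →
      ((Nat.toDigitsCore 10 (f + 1) m acc).map (fun c => (PySem.Int.ofChars? [c]).getD 0)).sum
        = ((Nat.digits 10 m).sum : Int)
          + ((acc.map (fun c => (PySem.Int.ofChars? [c]).getD 0)).sum) := by
    intro f
    induction f with
    | zero =>
      intro m acc hm
      interval_cases m
      have h0 : Nat.toDigitsCore 10 1 0 acc = '0' :: acc := rfl
      rw [h0]
      simp
      decide
    | succ f ih =>
      intro m acc hm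
      rw [Nat.toDigitsCore]
      by_cases h0 : m / 10 = 0
      · simp only [h0, if_pos]
        have hm10 : m < 10 := by omega
        interval_cases m <;> simp [Nat.digits] <;> decide
      · simp only [h0, if_false]
        have hlt : m / 10 ≤ f := by omega
        rw [Nat.digits_def' (b := 10) (by norm_num) (show 0 < m by omega)]
        rw [ih (m / 10) _ hlt]
        have hd : m % 10 < 10 := by omega
        have hc : ((PySem.Int.ofChars? [(m % 10).digitChar]).getD 0) = ((m % 10 : Nat) : Int) := by
          interval_cases h : (m % 10) <;> decide
        simp only [List.map_cons, List.sum_cons, hc]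
        push_cast
        ring
  have hn : ¬ n < 0 := by omega
  unfold pyDigitSum
  rw [show PySem.Int.toChars n = Nat.toDigits 10 n.toNat by simp [PySem.Int.toChars, hn]]
  rw [Nat.toDigits]
  rw [key n.toNat n.toNat [] (le_refl _)]
  simp

theorem pyDigitSum_lt (n : Int) (h : 10 ≤ n) : (pyDigitSum n).toNat < n.toNat := by
  rw [pyDigitSum_eq_digits n (by omega)]
  have hm : 10 ≤ n.toNat := by omega
  have hd : (Nat.digits 10 n.toNat).sum < n.toNat := by
    rw [Nat.digits_def' (b := 10) (by norm_num) (by omega)]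
    have h1 : (Nat.digits 10 (n.toNat / 10)).sum ≤ n.toNat / 10 := Nat.digit_sum_le 10 _
    simp only [List.sum_cons]
    omega
  omega

-- literal port of A's inner helper single_digit_sum: while n >= 10: n = sum of digits of str(n)
def singleDigitSum (n : Int) : Int :=
  if h : 10 ≤ n then singleDigitSum (pyDigitSum n) else n
termination_by n.toNat
decreasing_by exact pyDigitSum_lt n h

def are_encryptions_same (s1 : String) (s2 : String) : Bool :=
  let len_s1_single_digit := singleDigitSum (PySem.Str.len s1 - 2)
  let len_s2_single_digit := singleDigitSum (PySem.Str.len s2 - 2)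
  decide ((PySem.Str.pyGet? s1 0, PySem.Str.pyGet? s1 (-1), len_s1_single_digit)
        = (PySem.Str.pyGet? s2 0, PySem.Str.pyGet? s2 (-1), len_s2_single_digit))

-- ===== PORT B =====
def digitalRoot (n : Int) : Int := if n < 10 then n else 1 + PySem.Int.mod (n - 1) 9

def are_encryptions_same_alt (s1 : String) (s2 : String) : Bool :=
  decide ((PySem.Str.pyGet? s1 0, PySem.Str.pyGet? s1 (-1), digitalRoot (PySem.Str.len s1 - 2))
        = (PySem.Str.pyGet? s2 0, PySem.Str.pyGet? s2 (-1), digitalRoot (PySem.Str.len s2 - 2)))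

-- ===== PRECONDITION & SPEC =====
-- A raises IndexError on s1[0] / s2[0] when either string is empty (B raises there too); excluded.
def Pre_are_encryptions_same (s1 : String) (s2 : String) : Prop :=
  s1.toList ≠ [] ∧ s2.toList ≠ []
instance (s1 : String) (s2 : String) : Decidable (Pre_are_encryptions_same s1 s2) := by
  unfold Pre_are_encryptions_same; infer_instance
def pvWitness_are_encryptions_same : String × String := ("apple", "angle")

def Spec_are_encryptions_same (s1 : String) (s2 : String) (out : Bool) : Prop := out = are_encryptions_same_alt s1 s2
instance (s1 : String) (s2 : String) (out : Bool) : Decidable (Spec_are_encryptions_same s1 s2 out) := by unfold Spec_are_encryptions_same; infer_instance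

-- ===== CLAIM (what is proved, stated in full; the proofs are below) =====
def Claim_equal_are_encryptions_same : Prop := ∀ (s1 : String) (s2 : String), Dom_are_encryptions_same s1 s2 → Pre_are_encryptions_same s1 s2 → Spec_are_encryptions_same s1 s2 (are_encryptions_same s1 s2)

-- ===== LEMMAS AND PROOFS =====

theorem digits_sum_pos (m : Nat) (h : 0 < m) : 0 < (Nat.digits 10 m).sum := by
  have hne : Nat.digits 10 m ≠ [] := Nat.digits_ne_nil_iff_ne_zero.mpr (by omega)
  have hmem := List.getLast_mem hne
  have hlast := Nat.getLast_digit_ne_zero 10 (show m ≠ 0 by omega)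
  have := List.single_le_sum (fun x _ => Nat.zero_le x) _ hmem
  omega

theorem digits_sum_mod9 (m : Nat) : (Nat.digits 10 m).sum % 9 = m % 9 :=
  (Nat.modEq_nine_digits_sum m).symm

theorem singleDigitSum_eq_digitalRoot (n : Int) : singleDigitSum n = digitalRoot n := by
  have main : ∀ (k : Nat) (n : Int), n.toNat ≤ k → singleDigitSum n = digitalRoot n := by
    intro k
    induction k with
    | zero =>
      intro n hn
      have h10 : ¬ 10 ≤ n := by omega
      rw [singleDigitSum, dif_neg h10, digitalRoot, if_pos (by omega)]
    | succ k ih =>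
      intro n hn
      by_cases h : 10 ≤ n
      · have hs := pyDigitSum_eq_digits n (by omega)
        set s := pyDigitSum n with hsdef
        have hslt : s.toNat < n.toNat := pyDigitSum_lt n h
        have hs0 : 0 ≤ s := by rw [hs]; positivity
        have hspos : 1 ≤ s := by
          rw [hs]
          have := digits_sum_pos n.toNat (by omega)
          omega
        have hmod : s % 9 = n % 9 := by
          have h9 := digits_sum_mod9 n.toNat
          have hcast : (s % 9 : Int) = ((Nat.digits 10 n.toNat).sum % 9 : Nat) := by
            rw [hs]; push_cast; rfl
          rw [hcast, h9]
          push_cast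
          omega
        rw [singleDigitSum, dif_pos h, ih s (by omega)]
        rw [digitalRoot, digitalRoot]
        have hfm : ∀ a : Int, PySem.Int.mod a 9 = a % 9 := by
          intro a
          show a.fmod 9 = a % 9
          rw [Int.fmod_eq_emod]
          omega
        by_cases hs10 : s < 10
        · rw [if_pos hs10, if_neg (by omega), hfm]
          omega
        · rw [if_neg hs10, if_neg (by omega), hfm, hfm]
          omega
      · rw [singleDigitSum, dif_neg h, digitalRoot, if_pos (by omega)]
  exact main n.toNat n (le_refl _)

-- ===== VERDICT (by name: the statement is the Claim_ definition above) =====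
theorem are_encryptions_same_spec : Claim_equal_are_encryptions_same := by
  intro s1 s2 _ _
  unfold Spec_are_encryptions_same are_encryptions_same are_encryptions_same_alt
  simp only [singleDigitSum_eq_digitalRoot]
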